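-- pv_equiv track=rewrite | github.com/pypi-data/pypi-mirror-397 | packages/chloros-sdk/chloros_sdk-1.0.0.tar.gz/chloros_sdk-1.0.0/remove_progressbar_debug_proper.py | remove_console_logs
-- ===== SOURCE A (Python) =====
-- def remove_console_logs(content):
--     """Remove console.log statements with [DEBUG] ProgressBar: pattern"""
--     lines = content.split('\n')
--     result = []
--     i = 0
--     removed_count = 0
--
--     while i < len(lines):
--         line = lines[i]
--
--         # Check if this is a console.log with [DEBUG] ProgressBar
--         if 'console.log' in line and '[DEBUG] ProgressBar:' in line:
--             # Check if it's a single-line console.log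
--             if line.strip().endswith(');'):
--                 # Single line console.log - just skip it
--                 removed_count += 1
--                 i += 1
--                 continue
--             else:
--                 # Multi-line console.log - skip until we find the closing );
--                 removed_count += 1
--                 paren_count = line.count('(') - line.count(')')
--                 i += 1
--                 while i < len(lines) and paren_count > 0:
--                     paren_count += lines[i].count('(') - lines[i].count(')')
--                     i += 1
--                 continue
--
--         result.append(line)
--         i += 1
--
--     return '\n'.join(result), removed_count
-- ===== SOURCE B (Python) =====
-- def remove_console_logs(content):
--     """Remove console.log statements with [DEBUG] ProgressBar: pattern"""
--     lines = content.split('\n')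
--     n = len(lines)
--     # Stage 1: prefix sums of parenthesis balance; S[j] = balance of lines[0:j].
--     S = [0]
--     for l in lines:
--         S.append(S[-1] + l.count('(') - l.count(')'))
--     # Stage 2: nxt[i] = the first j > i with S[j] <= S[i] (else n), i.e. where a
--     # multi-line statement opened at line i closes.  Monotonic stack, right to left.
--     stack = []
--     rev = []
--     for i in range(n, -1, -1):
--         while stack and S[stack[-1]] > S[i]:
--             stack.pop()
--         if i < n:
--             rev.append(stack[-1] if stack else n)
--         stack.append(i)
--     nxt = rev[::-1]
--     # Stage 3: walk the line indices, jumping over removed statements via nxt.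
--     out = []
--     removed = 0
--     i = 0
--     while i < n:
--         line = lines[i]
--         if 'console.log' in line and '[DEBUG] ProgressBar:' in line:
--             removed += 1
--             i = i + 1 if line.strip().endswith(');') else nxt[i]
--         else:
--             out.append(line)
--             i += 1
--     return '\n'.join(out), removed
-- ===== Notes on version B (the rewrite author's own statement) =====
-- stated objective: alternative
-- what changed: Replaced A's on-the-fly nested while-loops by three staged passes: prefix sums of paren balance, a monotonic-stack pass computing for every line the index where a statement opened there closes (next prefix-sum <= current), and an index-jumping walk that drops removed ranges via that table.
import Mathlib
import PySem

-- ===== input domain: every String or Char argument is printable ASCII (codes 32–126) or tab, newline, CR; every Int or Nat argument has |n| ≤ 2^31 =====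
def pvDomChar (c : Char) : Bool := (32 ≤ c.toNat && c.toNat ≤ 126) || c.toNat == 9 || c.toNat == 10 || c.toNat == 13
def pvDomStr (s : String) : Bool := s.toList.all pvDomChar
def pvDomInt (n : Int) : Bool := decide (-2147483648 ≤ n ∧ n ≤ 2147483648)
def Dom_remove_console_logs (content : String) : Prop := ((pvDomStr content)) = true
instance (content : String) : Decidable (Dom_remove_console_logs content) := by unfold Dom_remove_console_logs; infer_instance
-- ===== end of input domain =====

-- B replaces A's single pass with nested while-loops by three staged passes (prefix sums of
-- paren balance, a monotonic-stack "next prefix-sum ≤ current" table, and an index-jumping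
-- walk that skips removed ranges via that table); objective: alternative (same O(n) cost).

-- ===== PORT A =====
-- tiny expression helpers shared by both ports (both Pythons compute these same expressions)
def pvIsTarget (l : String) : Bool :=
  PySem.Str.isIn "console.log" l && PySem.Str.isIn "[DEBUG] ProgressBar:" l

def pvCnt (l : String) : Int :=
  (PySem.Str.count l "(" : Int) - (PySem.Str.count l ")" : Int)

-- A's inner while-loop: skip lines while paren_count > 0
def pvSkipA : List String → Int → List String
  | [], _ => []
  | l :: ls, p => if p > 0 then pvSkipA ls (p + pvCnt l) else l :: ls

theorem pvSkipA_len_le : ∀ (ls : List String) (p : Int), (pvSkipA ls p).length ≤ ls.length := by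
  intro ls
  induction ls with
  | nil => intro p; simp [pvSkipA]
  | cons l ls ih =>
    intro p
    simp only [pvSkipA]
    split
    · exact Nat.le_trans (ih _) (Nat.le_succ _)
    · simp

-- A's outer while-loop over the line index
def pvMainA : List String → List String × Int
  | [] => ([], 0)
  | l :: ls =>
    if pvIsTarget l then
      if PySem.Str.endswith (PySem.Str.strip l) ");" then
        let r := pvMainA ls
        (r.1, r.2 + 1)
      else
        let r := pvMainA (pvSkipA ls (pvCnt l))
        (r.1, r.2 + 1)
    else
      let r := pvMainA ls
      (l :: r.1, r.2)
termination_by ls => ls.length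
decreasing_by
  · simp
  · exact Nat.lt_succ_of_le (pvSkipA_len_le _ _)
  · simp

def remove_console_logs (content : String) : String × Int :=
  let r := pvMainA ((PySem.Str.split? content "\n").getD [])
  (PySem.Str.join "\n" r.1, r.2)

-- ===== PORT B =====
-- Stage 1: S = [0]; for l in lines: S.append(S[-1] + cnt(l))  — a left scan
def pvPrefB (lines : List String) : List Int :=
  lines.scanl (fun s l => s + pvCnt l) 0

-- Stage 2's inner while-loop: pop stack indices whose prefix sum exceeds v
-- (python reads S[stack[-1]]; the indices are always in range, so getD is exact)
def pvPopB (S : List Int) (v : Int) : List Nat → List Nat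
  | [] => []
  | j :: st => if S.getD j 0 > v then pvPopB S v st else j :: st

-- Stage 2's loop body over i = n, n-1, …, 0; state = (stack, rev).
-- python appends to rev and reverses at the end; accumulating by cons here
-- produces exactly that reversed list (nxt) directly.
def pvStepNxtB (S : List Int) (n : Nat) (st : List Nat × List Nat) (i : Nat) :
    List Nat × List Nat :=
  let stack := pvPopB S (S.getD i 0) st.1
  let rev := if i < n then (match stack with | [] => n | j :: _ => j) :: st.2 else st.2
  (i :: stack, rev)

def pvNxtB (S : List Int) (n : Nat) : List Nat :=
  (((List.range (n + 1)).reverse).foldl (pvStepNxtB S n) ([], [])).2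

-- Stage 3: the index-jumping walk.  fuel only makes the recursion structural;
-- it starts at n+1 and the walk visits at most n+1 indices (nxt[i] > i), so the
-- fuel-0 branch is never reached.
def pvMainB (lines : List String) (nxt : List Nat) : Nat → Nat → List String × Int
  | 0, _ => ([], 0)
  | fuel + 1, i =>
    if i < lines.length then
      let line := lines.getD i ""
      if pvIsTarget line then
        let i' := if PySem.Str.endswith (PySem.Str.strip line) ");" then i + 1 else nxt.getD i 0
        let r := pvMainB lines nxt fuel i'
        (r.1, r.2 + 1)
      else
        let r := pvMainB lines nxt fuel (i + 1)
        (line :: r.1, r.2)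
    else ([], 0)

def remove_console_logs_alt (content : String) : String × Int :=
  let lines := (PySem.Str.split? content "\n").getD []
  let n := lines.length
  let S := pvPrefB lines
  let nxt := pvNxtB S n
  let r := pvMainB lines nxt (n + 1) 0
  (PySem.Str.join "\n" r.1, r.2)

-- ===== PRECONDITION & SPEC =====
def Spec_remove_console_logs (content : String) (out : String × Int) : Prop := out = remove_console_logs_alt content
instance (content : String) (out : String × Int) : Decidable (Spec_remove_console_logs content out) := by unfold Spec_remove_console_logs; infer_instance

-- ===== CLAIM (what is proved, stated in full; the proofs are below) =====
def Claim_equal_remove_console_logs : Prop := ∀ (content : String), Dom_remove_console_logs content → Spec_remove_console_logs content (remove_console_logs content)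

-- ===== LEMMAS AND PROOFS =====

-- first index j with k ≤ j < n and S[j] ≤ v, else n (j = n needs no test: the walk stops there)
def pvFirstLE (S : List Int) (n : Nat) (v : Int) (k : Nat) : Nat :=
  if h : k < n then (if S.getD k 0 ≤ v then k else pvFirstLE S n v (k + 1)) else n
termination_by n - k

def pvNextLE (S : List Int) (n : Nat) (i : Nat) : Nat :=
  pvFirstLE S n (S.getD i 0) (i + 1)

theorem pvFirstLE_ge (S : List Int) (n : Nat) (v : Int) :
    ∀ k, k ≤ n → k ≤ pvFirstLE S n v k := by
  intro k
  induction k using pvFirstLE.induct S n v with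
  | case1 k h hle => intro _; rw [pvFirstLE, dif_pos h, if_pos hle]
  | case2 k h hgt ih =>
    intro _
    rw [pvFirstLE, dif_pos h, if_neg hgt]
    have := ih (by omega)
    omega
  | case3 k h => intro hk; rw [pvFirstLE, dif_neg h]; exact hk

theorem pvFirstLE_gt (S : List Int) (n : Nat) (v : Int) :
    ∀ k j, k ≤ j → j < pvFirstLE S n v k → S.getD j 0 > v := by
  intro k
  induction k using pvFirstLE.induct S n v with
  | case1 k h hle =>
    intro j h1 h2; rw [pvFirstLE, dif_pos h, if_pos hle] at h2; omega
  | case2 k h hgt ih =>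
    intro j h1 h2
    rw [pvFirstLE, dif_pos h, if_neg hgt] at h2
    rcases Nat.eq_or_lt_of_le h1 with rfl | hlt
    · omega
    · exact ih j hlt h2
  | case3 k h =>
    intro j h1 h2; rw [pvFirstLE, dif_neg h] at h2; omega

theorem pvFirstLE_found (S : List Int) (n : Nat) (v : Int) :
    ∀ k, pvFirstLE S n v k = n ∨ S.getD (pvFirstLE S n v k) 0 ≤ v := by
  intro k
  induction k using pvFirstLE.induct S n v with
  | case1 k h hle => right; rw [pvFirstLE, dif_pos h, if_pos hle]; exact hle
  | case2 k h hgt ih => rw [pvFirstLE, dif_pos h, if_neg hgt]; exact ih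
  | case3 k h => left; rw [pvFirstLE, dif_neg h]

theorem pvFirstLE_congr (S : List Int) (n : Nat) (v : Int) :
    ∀ m k, k ≤ m → (∀ j, k ≤ j → j < m → S.getD j 0 > v) →
      pvFirstLE S n v k = pvFirstLE S n v m := by
  intro m
  induction m with
  | zero =>
    intro k hk _
    have : k = 0 := by omega
    rw [this]
  | succ m ih =>
    intro k hk hall
    rcases Nat.eq_or_lt_of_le hk with rfl | hlt
    · rfl
    · rw [ih k (by omega) (fun j a b => hall j a (by omega))]
      by_cases h : m < n
      · rw [pvFirstLE, dif_pos h,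
          if_neg (by have := hall m (by omega) (by omega); omega)]
      · rw [pvFirstLE, pvFirstLE, dif_neg h, dif_neg (show ¬ m + 1 < n by omega)]

theorem pvNextLE_gt (S : List Int) (n : Nat) (i : Nat) (hi : i < n) : i < pvNextLE S n i := by
  have := pvFirstLE_ge S n (S.getD i 0) (i + 1) (by omega); unfold pvNextLE; omega

theorem pvFirstLE_le_n (S : List Int) (n : Nat) (v : Int) :
    ∀ k, k ≤ n → pvFirstLE S n v k ≤ n := by
  intro k
  induction k using pvFirstLE.induct S n v with
  | case1 k h hle => intro _; rw [pvFirstLE, dif_pos h, if_pos hle]; omega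
  | case2 k h hgt ih => intro _; rw [pvFirstLE, dif_pos h, if_neg hgt]; exact ih (by omega)
  | case3 k h => intro _; rw [pvFirstLE, dif_neg h]

-- the monotonic stack of stage 2, characterised: it is the chain of pvNextLE jumps
def pvChain (S : List Int) (n : Nat) (i : Nat) : List Nat :=
  if h : i < n then
    i :: (if S.getD (pvNextLE S n i) 0 ≤ S.getD i 0 then pvChain S n (pvNextLE S n i) else [])
  else [i]
termination_by n - i
decreasing_by have := pvNextLE_gt S n i h; omega

-- popping the chain lands at the pvFirstLE position (or empties the stack if none exists)
theorem pvPop_chain (S : List Int) (n : Nat) (v : Int) :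
    ∀ k, k ≤ n →
      pvPopB S v (pvChain S n k) =
        (if S.getD (pvFirstLE S n v k) 0 ≤ v then pvChain S n (pvFirstLE S n v k) else []) := by
  intro k
  induction k using pvChain.induct S n with
  | case1 k h ih =>
    intro hk
    by_cases hle : S.getD k 0 ≤ v
    · -- S[k] ≤ v: nothing is popped, pvFirstLE stops at k
      have hf : pvFirstLE S n v k = k := by rw [pvFirstLE, dif_pos h, if_pos hle]
      rw [hf, if_pos hle]
      conv_lhs => rw [pvChain, dif_pos h]
      conv_rhs => rw [pvChain, dif_pos h]
      rw [pvPopB, if_neg (by omega)]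
    · -- S[k] > v: k is popped
      have hstep : pvFirstLE S n v k = pvFirstLE S n v (k + 1) := by
        rw [pvFirstLE, dif_pos h, if_neg hle]
      have hnkgt : k < pvNextLE S n k := pvNextLE_gt S n k h
      have hjump : pvFirstLE S n v (k + 1) = pvFirstLE S n v (pvNextLE S n k) := by
        apply pvFirstLE_congr
        · omega
        · intro j hj1 hj2
          have := pvFirstLE_gt S n (S.getD k 0) (k + 1) j hj1 hj2
          omega
      conv_lhs => rw [pvChain, dif_pos h]
      rw [pvPopB, if_pos (by omega)]
      by_cases hfound : S.getD (pvNextLE S n k) 0 ≤ S.getD k 0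
      · rw [if_pos hfound]
        have hnkle : pvNextLE S n k ≤ n := pvFirstLE_le_n S n (S.getD k 0) (k + 1) (by omega)
        rw [ih hnkle, hstep, hjump]
      · rw [if_neg hfound, pvPopB]
        -- nothing ≤ S[k] after k, so nothing ≤ v either; pvFirstLE v k = n and S[n] > v
        have hnkn : pvNextLE S n k = n := by
          rcases pvFirstLE_found S n (S.getD k 0) (k + 1) with h' | h'
          · exact h'
          · exact absurd h' hfound
        have hall : ∀ j, k + 1 ≤ j → j < n → S.getD j 0 > v := by
          intro j hj1 hj2
          have := pvFirstLE_gt S n (S.getD k 0) (k + 1) j hj1 (by rw [← hnkn] at hj2; exact hj2)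
          omega
        have hfn : pvFirstLE S n v k = n := by
          rw [hstep, pvFirstLE_congr S n v n (k + 1) (by omega) hall, pvFirstLE,
            dif_neg (lt_irrefl n)]
        rw [hfn, if_neg (by rw [← hnkn]; omega)]
  | case2 k h =>
    intro hk
    obtain rfl : n = k := by omega
    have hf : pvFirstLE S n v n = n := by rw [pvFirstLE, dif_neg h]
    rw [hf]
    conv_lhs => rw [pvChain, dif_neg h]
    by_cases hle : S.getD n 0 ≤ v
    · rw [if_pos hle, pvPopB, if_neg (by omega)]
      conv_rhs => rw [pvChain, dif_neg h]
    · rw [if_neg hle, pvPopB, if_pos (by omega), pvPopB]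

-- head of the chain is its index
theorem pvChain_head (S : List Int) (n : Nat) (i : Nat) :
    ∃ t, pvChain S n i = i :: t := by
  rw [pvChain]; split
  · exact ⟨_, rfl⟩
  · exact ⟨[], rfl⟩

-- the stage-2 fold, run from index i up: state = (chain i, map pvNextLE [i, …, n-1])
theorem pvFold_inv (S : List Int) (n : Nat) :
    ∀ i, i ≤ n →
      ((List.range' i (n + 1 - i)).reverse).foldl (pvStepNxtB S n) ([], []) =
        (pvChain S n i, (List.range' i (n - i)).map (pvNextLE S n)) := by
  intro i hi
  induction hn : n - i generalizing i with
  | zero =>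
    have hin : i = n := by omega
    subst hin
    simp only [Nat.add_sub_cancel_left, List.range'_one, List.reverse_cons, List.reverse_nil,
      List.nil_append, List.foldl_cons, List.foldl_nil, List.range'_zero, List.map_nil]
    unfold pvStepNxtB
    simp only [pvPopB, lt_irrefl, if_false]
    rw [pvChain]
    simp
  | succ m ih =>
    have hin : i < n := by omega
    have hsplit : List.range' i (n + 1 - i) = i :: List.range' (i + 1) (n + 1 - (i + 1)) := by
      rw [show n + 1 - i = (n + 1 - (i + 1)) + 1 by omega, List.range'_succ]
    rw [hsplit]
    simp only [List.reverse_cons, List.foldl_append, List.foldl_cons, List.foldl_nil]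
    rw [ih (i + 1) (by omega) (by omega)]
    unfold pvStepNxtB
    simp only
    rw [pvPop_chain S n (S.getD i 0) (i + 1) (by omega)]
    have hfeq : pvFirstLE S n (S.getD i 0) (i + 1) = pvNextLE S n i := rfl
    rw [hfeq]
    by_cases hfound : S.getD (pvNextLE S n i) 0 ≤ S.getD i 0
    · rw [if_pos hfound]
      obtain ⟨t, ht⟩ := pvChain_head S n (pvNextLE S n i)
      simp only [Prod.mk.injEq]
      constructor
      · conv_rhs => rw [pvChain, dif_pos hin, if_pos hfound]
      · rw [if_pos hin, ht, List.range'_succ, List.map_cons]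
    · rw [if_neg hfound]
      have hn' : pvNextLE S n i = n := by
        rcases pvFirstLE_found S n (S.getD i 0) (i + 1) with h' | h'
        · exact h'
        · exact absurd h' hfound
      simp only [Prod.mk.injEq]
      constructor
      · conv_rhs => rw [pvChain, dif_pos hin, if_neg hfound]
      · rw [if_pos hin, List.range'_succ, List.map_cons]
        simp [hn']

-- hence the computed table is pointwise pvNextLE
theorem pvNxtB_eq (S : List Int) (n : Nat) :
    pvNxtB S n = (List.range' 0 n).map (pvNextLE S n) := by
  unfold pvNxtB
  rw [show List.range (n + 1) = List.range' 0 (n + 1 - 0) by simp [List.range_eq_range']]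
  rw [pvFold_inv S n 0 (by omega)]
  simp

theorem pvNxtB_getD (S : List Int) (n : Nat) (i : Nat) (hi : i < n) :
    (pvNxtB S n).getD i 0 = pvNextLE S n i := by
  rw [pvNxtB_eq]
  rw [List.getD_eq_getElem?_getD]
  rw [List.getElem?_eq_getElem (by simpa using hi)]
  simp

-- prefix-sum step lemma for the scanl of stage 1
theorem pvPrefB_succ' (f : String → Int) :
    ∀ (l : List String) (a : Int) (k : Nat), k < l.length →
      (l.scanl (fun s x => s + f x) a).getD (k + 1) 0 =
        (l.scanl (fun s x => s + f x) a).getD k 0 + f (l.getD k "") := by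
  intro l
  induction l with
  | nil => intro a k hk; simp at hk
  | cons x xs ih =>
    intro a k hk
    rw [List.scanl_cons]
    cases k with
    | zero =>
      simp only [List.getD_cons_succ, List.getD_cons_zero]
      cases xs with
      | nil => simp [List.scanl]
      | cons y ys => simp [List.scanl]
    | succ k =>
      simp only [List.getD_cons_succ]
      exact ih (a + f x) k (by simpa using hk)

theorem pvPrefB_succ (lines : List String) (k : Nat) (hk : k < lines.length) :
    (pvPrefB lines).getD (k + 1) 0 = (pvPrefB lines).getD k 0 + pvCnt (lines.getD k "") :=
  pvPrefB_succ' pvCnt lines 0 k hk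

-- A's inner skip loop, characterised through the prefix sums: starting the skip at
-- index k with balance S[k] - v, it stops exactly at pvFirstLE v k
theorem pvSkip_char (lines : List String) :
    ∀ k, k ≤ lines.length → ∀ v,
      pvSkipA (lines.drop k) ((pvPrefB lines).getD k 0 - v) =
        lines.drop (pvFirstLE (pvPrefB lines) lines.length v k) := by
  intro k hk
  induction hm : lines.length - k generalizing k with
  | zero =>
    intro v
    have hkn : k = lines.length := by omega
    subst hkn
    rw [pvFirstLE]
    simp [pvSkipA]
  | succ m ih =>
    intro v
    have hkn : k < lines.length := by omega
    have hdrop : lines.drop k = lines.getD k "" :: lines.drop (k + 1) := by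
      rw [List.drop_eq_getElem_cons hkn]
      congr 1
      rw [List.getD_eq_getElem?_getD, List.getElem?_eq_getElem hkn]
      rfl
    rw [hdrop, pvSkipA]
    by_cases hgt : (pvPrefB lines).getD k 0 - v > 0
    · rw [if_pos hgt]
      have harg : (pvPrefB lines).getD k 0 - v + pvCnt (lines.getD k "") =
          (pvPrefB lines).getD (k + 1) 0 - v := by
        rw [pvPrefB_succ lines k hkn]; ring
      have hstep : pvFirstLE (pvPrefB lines) lines.length v k =
          pvFirstLE (pvPrefB lines) lines.length v (k + 1) := by
        rw [pvFirstLE, dif_pos hkn, if_neg (by omega)]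
      rw [harg, ih (k + 1) (by omega) (by omega), hstep]
    · rw [if_neg hgt]
      have hf : pvFirstLE (pvPrefB lines) lines.length v k = k := by
        rw [pvFirstLE, dif_pos hkn, if_pos (by omega)]
      rw [hf, hdrop]

-- the stage-3 walk from index i computes A's outer loop on the line suffix
theorem pvMainB_eq (lines : List String) :
    ∀ fuel i, lines.length - i < fuel → i ≤ lines.length →
      pvMainB lines (pvNxtB (pvPrefB lines) lines.length) fuel i = pvMainA (lines.drop i) := by
  intro fuel
  induction fuel with
  | zero => intro i h1 _; omega
  | succ fuel ih =>
    intro i h1 h2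
    by_cases hin : i < lines.length
    · have hdrop : lines.drop i = lines.getD i "" :: lines.drop (i + 1) := by
        rw [List.drop_eq_getElem_cons hin]
        congr 1
        rw [List.getD_eq_getElem?_getD, List.getElem?_eq_getElem hin]
        rfl
      rw [pvMainB, if_pos hin, hdrop, pvMainA]
      by_cases ht : pvIsTarget (lines.getD i "") = true
      · simp only [if_pos ht]
        by_cases he : PySem.Str.endswith (PySem.Str.strip (lines.getD i "")) ");" = true
        · simp only [if_pos he]
          rw [ih (i + 1) (by omega) (by omega)]
        · simp only [if_neg he]
          rw [pvNxtB_getD (pvPrefB lines) lines.length i hin]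
          have hskip : pvSkipA (lines.drop (i + 1)) (pvCnt (lines.getD i "")) =
              lines.drop (pvNextLE (pvPrefB lines) lines.length i) := by
            have := pvSkip_char lines (i + 1) (by omega) ((pvPrefB lines).getD i 0)
            rw [pvPrefB_succ lines i hin] at this
            simpa using this
          rw [hskip]
          have hgt := pvNextLE_gt (pvPrefB lines) lines.length i hin
          have hle := pvFirstLE_le_n (pvPrefB lines) lines.length
            ((pvPrefB lines).getD i 0) (i + 1) (by omega)
          rw [ih (pvNextLE (pvPrefB lines) lines.length i) (by unfold pvNextLE at *; omega)
            (by unfold pvNextLE at *; omega)]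
      · simp only [if_neg ht]
        rw [ih (i + 1) (by omega) (by omega)]
    · have hieq : i = lines.length := by omega
      rw [pvMainB, if_neg hin, hieq]
      simp [pvMainA]

-- ===== VERDICT (by name: the statement is the Claim_ definition above) =====
theorem remove_console_logs_spec : Claim_equal_remove_console_logs := by
  intro content _
  unfold Spec_remove_console_logs remove_console_logs remove_console_logs_alt
  dsimp only
  rw [pvMainB_eq ((PySem.Str.split? content "\n").getD []) _ 0 (by omega) (by omega),
    List.drop_zero]
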